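-- pv_equiv track=rewrite | github.com/Lutmak/polysub | subtitles.py | _word_highlight_line
-- ===== SOURCE A (Python) =====
-- CYAN       = "&H00FFE500"   # #00E5FF in ASS BGR order
--
-- def _word_highlight_line(
--     words: list[str],
--     highlight_idx: int,
--     base_color: str,
--     highlight_color: str = CYAN,
-- ) -> str:
--     """
--     Build ASS override string with one word highlighted in cyan.
--     Other words use base_color.
--     """
--     parts = []
--     for i, w in enumerate(words):
--         if i == highlight_idx:
--             parts.append(f"{{\\c{highlight_color}}}{w}{{\\c{base_color}}}")
--         else:
--             parts.append(w)
--     return " ".join(parts)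
-- ===== SOURCE B (Python) =====
-- CYAN       = "&H00FFE500"   # #00E5FF in ASS BGR order
--
-- def _word_highlight_line(
--     words: list[str],
--     highlight_idx: int,
--     base_color: str,
--     highlight_color: str = CYAN,
-- ) -> str:
--     """Build ASS override string with one word highlighted.
--
--     Builds the line back-to-front: walks the words from last to first,
--     prepending each word (highlighted if its index matches) and its
--     separator onto the line built so far -- no parts list, no join."""
--     line = None
--     i = len(words) - 1
--     for w in reversed(words):
--         piece = (
--             f"{{\\c{highlight_color}}}{w}{{\\c{base_color}}}"
--             if i == highlight_idx
--             else w
--         )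
--         line = piece if line is None else piece + " " + line
--         i -= 1
--     return "" if line is None else line
-- ===== Notes on version B (the rewrite author's own statement) =====
-- stated objective: alternative
-- what changed: Replaces the enumerate-append-then-join pipeline (build a parts list, then ' '.join) by a back-to-front traversal over reversed(words) that prepends each piece and its separator onto the accumulated line string directly, counting the index down instead of comparing enumerate counters.
import Mathlib
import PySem

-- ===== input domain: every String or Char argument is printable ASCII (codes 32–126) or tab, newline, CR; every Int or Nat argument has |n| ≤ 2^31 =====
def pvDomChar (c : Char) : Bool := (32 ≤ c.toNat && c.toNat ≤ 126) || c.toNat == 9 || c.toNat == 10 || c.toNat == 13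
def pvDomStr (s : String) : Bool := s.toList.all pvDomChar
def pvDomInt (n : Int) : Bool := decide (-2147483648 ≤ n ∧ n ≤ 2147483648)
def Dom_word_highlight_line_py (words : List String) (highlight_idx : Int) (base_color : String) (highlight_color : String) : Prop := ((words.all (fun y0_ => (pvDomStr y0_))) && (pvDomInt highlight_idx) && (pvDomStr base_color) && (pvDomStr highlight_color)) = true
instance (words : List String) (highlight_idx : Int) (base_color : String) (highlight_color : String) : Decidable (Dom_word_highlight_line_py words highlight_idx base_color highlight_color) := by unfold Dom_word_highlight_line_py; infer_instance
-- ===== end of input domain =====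

-- B replaces A's build-a-parts-list-then-join pipeline by a back-to-front traversal of reversed(words) that prepends each piece and separator onto the line directly, counting the index down.
-- ===== PORT A =====
-- f"{{\\c{hc}}}{w}{{\\c{bc}}}"
def pvFmtA (w : String) (bc : String) (hc : String) : String :=
  "{\\c" ++ hc ++ "}" ++ w ++ "{\\c" ++ bc ++ "}"

def word_highlight_line_py (words : List String) (highlight_idx : Int) (base_color : String) (highlight_color : String) : String :=
  -- parts = []; for i, w in enumerate(words): append …; return " ".join(parts)
  let parts : List String :=
    (PySem.List.enumerate words).foldl
      (fun parts iw =>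
        if iw.1 = highlight_idx then
          parts ++ [pvFmtA iw.2 base_color highlight_color]
        else
          parts ++ [iw.2]) []
  PySem.Str.join " " parts

-- ===== PORT B =====
-- loop body: piece = highlighted w if i == highlight_idx else w; line = piece if line is None else piece + " " + line; i -= 1
def pvStepB (hi : Int) (bc hc : String) (st : Option String × Int) (w : String) : Option String × Int :=
  let piece := if st.2 = hi then "{\\c" ++ hc ++ "}" ++ w ++ "{\\c" ++ bc ++ "}" else w
  (some (match st.1 with
         | none => piece
         | some line => piece ++ " " ++ line), st.2 - 1)

def word_highlight_line_py_alt (words : List String) (highlight_idx : Int) (base_color : String) (highlight_color : String) : String :=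
  -- line = None; i = len(words) - 1; for w in reversed(words): …
  let st := words.reverse.foldl (pvStepB highlight_idx base_color highlight_color)
              (none, (words.length : Int) - 1)
  -- return "" if line is None else line
  match st.1 with
  | none => ""
  | some line => line

-- ===== PRECONDITION & SPEC =====
def Spec_word_highlight_line_py (words : List String) (highlight_idx : Int) (base_color : String) (highlight_color : String) (out : String) : Prop := out = word_highlight_line_py_alt words highlight_idx base_color highlight_color
instance (words : List String) (highlight_idx : Int) (base_color : String) (highlight_color : String) (out : String) : Decidable (Spec_word_highlight_line_py words highlight_idx base_color highlight_color out) := by unfold Spec_word_highlight_line_py; infer_instance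

-- ===== CLAIM =====
def Claim_equal_word_highlight_line_py : Prop := ∀ (words : List String) (highlight_idx : Int) (base_color : String) (highlight_color : String), Dom_word_highlight_line_py words highlight_idx base_color highlight_color → Spec_word_highlight_line_py words highlight_idx base_color highlight_color (word_highlight_line_py words highlight_idx base_color highlight_color)

-- ===== LEMMAS AND PROOFS =====
-- A's loop body as a map over the enumeration
lemma pvA_parts (words : List String) (hi : Int) (bc hc : String) :
    (PySem.List.enumerate words).foldl
      (fun parts iw =>
        if iw.1 = hi then parts ++ [pvFmtA iw.2 bc hc] else parts ++ [iw.2]) [] =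
    (PySem.List.enumerate words).map (fun iw => if iw.1 = hi then pvFmtA iw.2 bc hc else iw.2) := by
  have h := PySem.List.foldl_append_singleton_eq_map
    (l := PySem.List.enumerate words)
    (f := fun iw : Int × String => if iw.1 = hi then pvFmtA iw.2 bc hc else iw.2) (acc := [])
  simp only [List.nil_append] at h
  rw [← h]
  apply PySem.List.foldl_congr_mem
  intro acc iw _
  split <;> rfl

-- " ".join of a one-element list is that element
lemma pvJoin_singleton (x : String) : PySem.Str.join " " [x] = x := by
  apply String.toList_inj.mp
  simp [PySem.Str.toList_join, PySem.Chars.join_singleton]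

-- " ".join on a two-or-more list peels one element and one separator
lemma pvJoin_cons_cons (x y : String) (rest : List String) :
    PySem.Str.join " " (x :: y :: rest) = x ++ " " ++ PySem.Str.join " " (y :: rest) := by
  have hsp : (" " : String).toList = [' '] := by decide
  apply String.toList_inj.mp
  simp [PySem.Str.toList_join, PySem.Chars.join_cons_cons, hsp]

-- B's right-fold (the reversed-traversal loop) computes the join of A's mapped enumeration
lemma pvFoldr_eq_join (words : List String) (hi : Int) (bc hc : String) (s : Int) :
    words.foldr (fun w st => pvStepB hi bc hc st w) (none, s + (words.length : Int) - 1) =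
    (if words = [] then none
     else some (PySem.Str.join " "
       ((PySem.List.enumerate words s).map
         (fun iw => if iw.1 = hi then pvFmtA iw.2 bc hc else iw.2))), s - 1) := by
  induction words generalizing s with
  | nil => simp
  | cons w t ih =>
    have hlen : s + ((w :: t).length : Int) - 1 = (s + 1) + (t.length : Int) - 1 := by
      simp only [List.length_cons]; push_cast; omega
    rw [List.foldr_cons, hlen, ih (s + 1)]
    rw [PySem.List.enumerate_cons, List.map_cons]
    cases t with
    | nil =>
      have h1 : s + 1 - 1 = s := by omega
      refine Prod.ext ?_ (by simp only [pvStepB]; omega)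
      simp only [PySem.List.enumerate_nil, List.map_nil, pvStepB, if_neg (List.cons_ne_nil w [])]
      rw [pvJoin_singleton]
      simp [h1, pvFmtA]
    | cons r u =>
      have h1 : s + 1 - 1 = s := by omega
      refine Prod.ext ?_ (by simp only [pvStepB]; omega)
      simp only [if_neg (List.cons_ne_nil r u), if_neg (List.cons_ne_nil w (r :: u)), pvStepB]
      rw [PySem.List.enumerate_cons r u (s + 1), List.map_cons, pvJoin_cons_cons]
      simp [h1, pvFmtA]

-- ===== VERDICT =====
theorem word_highlight_line_py_spec : Claim_equal_word_highlight_line_py := by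
  intro words hi bc hc _
  show word_highlight_line_py words hi bc hc = word_highlight_line_py_alt words hi bc hc
  unfold word_highlight_line_py word_highlight_line_py_alt
  rw [pvA_parts]
  rw [List.foldl_reverse]
  have h0 : (words.length : Int) - 1 = 0 + (words.length : Int) - 1 := by omega
  rw [h0, pvFoldr_eq_join words hi bc hc 0]
  cases words with
  | nil => simp [PySem.List.enumerate_nil, PySem.Str.join, PySem.Chars.join_nil]
  | cons w t => simp only [if_neg (List.cons_ne_nil w t)]
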